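-- pv_equiv track=rewrite | github.com/truconsent/truscanner | src/database/db_scanner.py | _identify_user_id_column
-- ===== SOURCE A (Python) =====
-- from typing import List, Dict, Any, Optional, Set
--
-- def _identify_user_id_column(table_name: str, columns: List[Dict[str, Any]]) -> Optional[str]:
--     """Identify the user ID column in a table using heuristics."""
--     col_names = [c['name'].lower() for c in columns]
--     col_name_map = {c['name'].lower(): c['name'] for c in columns}
--
--     # Priority 1: If table is 'users' or 'user', look for 'id'
--     if table_name.lower() in ('users', 'user'):
--         if 'id' in col_names:
--             return col_name_map['id']
--
--     # Priority 2: Exact matches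
--     user_id_patterns = ['user_id', 'userid', 'customer_id', 'customerid',
--                        'member_id', 'memberid', 'account_id', 'accountid']
--     for pattern in user_id_patterns:
--         if pattern in col_names:
--             return col_name_map[pattern]
--
--     # Priority 3: Suffix matches like xxx_user_id
--     for col in col_names:
--         if col.endswith('_user_id') or col.endswith('_customer_id'):
--             return col_name_map[col]
--
--     return None
-- ===== SOURCE B (Python) =====
-- from typing import List, Dict, Any, Optional
--
-- def _identify_user_id_column(table_name: str, columns: List[Dict[str, Any]]) -> Optional[str]:
--     """Identify the user ID column in a table using heuristics (scored-candidate version)."""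
--     col_name_map = {}
--     candidates = []
--     for j, c in enumerate(columns):
--         low = c['name'].lower()
--         col_name_map[low] = c['name']
--         if low.endswith('_user_id') or low.endswith('_customer_id'):
--             candidates.append(((3, j), low))
--     if table_name.lower() in ('users', 'user') and 'id' in col_name_map:
--         candidates.append(((1, 0), 'id'))
--     user_id_patterns = ['user_id', 'userid', 'customer_id', 'customerid',
--                         'member_id', 'memberid', 'account_id', 'accountid']
--     for i, p in enumerate(user_id_patterns):
--         if p in col_name_map:
--             candidates.append(((2, i), p))
--     best = None
--     for key, low in candidates:
--         if best is None or key < best[0]: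
--             best = (key, low)
--     return col_name_map[best[1]] if best is not None else None
-- ===== Notes on version B (the rewrite author's own statement) =====
-- stated objective: alternative
-- what changed: Replaces A's three sequential early-returning scans (priority-1 check, pattern loop, suffix loop) with one pass that builds a scored candidate list ((priority, index) keys) plus the name map, then selects the minimum-key candidate.
import Mathlib
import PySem

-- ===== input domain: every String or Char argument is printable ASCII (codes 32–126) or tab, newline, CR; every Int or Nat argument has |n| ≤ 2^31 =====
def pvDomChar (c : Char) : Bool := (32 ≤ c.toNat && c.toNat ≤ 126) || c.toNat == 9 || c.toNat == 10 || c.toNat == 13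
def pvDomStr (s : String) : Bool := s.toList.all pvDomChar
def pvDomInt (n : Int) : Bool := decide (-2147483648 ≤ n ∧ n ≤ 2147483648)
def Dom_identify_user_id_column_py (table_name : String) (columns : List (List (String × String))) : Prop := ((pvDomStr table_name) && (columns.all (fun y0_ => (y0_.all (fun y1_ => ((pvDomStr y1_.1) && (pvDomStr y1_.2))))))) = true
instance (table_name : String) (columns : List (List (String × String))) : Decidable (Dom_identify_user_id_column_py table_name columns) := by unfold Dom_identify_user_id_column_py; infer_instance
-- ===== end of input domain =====

-- B replaces A's three sequential early-returning scans by one candidate-building pass plus a minimum-key selection (alternative decomposition, same cost).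


-- ===== PORT A =====
-- shared literal pieces of both sources: c['name'], c['name'].lower(), the pattern list, the suffix test
def pvOrigName (c : List (String × String)) : String := (PySem.Dict.mk c).getD "name" ""
def pvLowName (c : List (String × String)) : String := PySem.Str.lower ((PySem.Dict.mk c).getD "name" "")
def pvPatterns : List String := ["user_id", "userid", "customer_id", "customerid", "member_id", "memberid", "account_id", "accountid"]
def pvIsSuffixHit (s : String) : Bool := PySem.Str.endswith s "_user_id" || PySem.Str.endswith s "_customer_id"

-- Priority 3 loop of A: first col ending with '_user_id'/'_customer_id'
def pvALoop3 (m : PySem.Dict String String) : List String → Option String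
  | [] => none
  | c :: rest => if pvIsSuffixHit c then m.get? c else pvALoop3 m rest

-- Priority 2 loop of A: first pattern present in col_names
def pvALoop2 (m : PySem.Dict String String) (names : List String) : List String → Option String
  | [] => pvALoop3 m names
  | p :: ps => if names.contains p then m.get? p else pvALoop2 m names ps

def identify_user_id_column_py (table_name : String) (columns : List (List (String × String))) : Option String :=
  let names := columns.map pvLowName
  let m := columns.foldl (fun d c => d.insert (pvLowName c) (pvOrigName c)) PySem.Dict.empty
  if (PySem.Str.lower table_name == "users" || PySem.Str.lower table_name == "user") && names.contains "id" then
    m.get? "id"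
  else
    pvALoop2 m names pvPatterns

-- ===== PORT B =====
-- Python tuple-key comparison (a, b) < (c, d) on naturals
def pvKeyLt (a b : Nat × Nat) : Bool := a.1 < b.1 || (a.1 == b.1 && a.2 < b.2)

-- the single scan of B: builds the name map, the (3, j) suffix candidates, and the running index
def pvBStep (st : PySem.Dict String String × List ((Nat × Nat) × String) × Nat) (c : List (String × String)) :
    PySem.Dict String String × List ((Nat × Nat) × String) × Nat :=
  let low := pvLowName c
  (st.1.insert low (pvOrigName c),
   (if pvIsSuffixHit low then st.2.1 ++ [((3, st.2.2), low)] else st.2.1),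
   st.2.2 + 1)

-- B's pattern pass: (2, i) candidates
def pvBPatStep (m : PySem.Dict String String) (st : List ((Nat × Nat) × String) × Nat) (p : String) :
    List ((Nat × Nat) × String) × Nat :=
  ((if m.contains p then st.1 ++ [((2, st.2), p)] else st.1), st.2 + 1)

-- B's min-selection step (strict <, so the first minimum wins)
def pvBMin (b : Option ((Nat × Nat) × String)) (kl : (Nat × Nat) × String) : Option ((Nat × Nat) × String) :=
  match b with
  | none => some kl
  | some b0 => if pvKeyLt kl.1 b0.1 then some kl else some b0

def identify_user_id_column_py_alt (table_name : String) (columns : List (List (String × String))) : Option String :=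
  let scan := columns.foldl pvBStep (PySem.Dict.empty, [], 0)
  let m := scan.1
  let cands1 :=
    if (PySem.Str.lower table_name == "users" || PySem.Str.lower table_name == "user") && m.contains "id" then
      [((1, 0), "id")]
    else []
  let cands2 := (pvPatterns.foldl (pvBPatStep m) ([], 0)).1
  let best := (scan.2.1 ++ cands1 ++ cands2).foldl pvBMin none
  match best with
  | none => none
  | some (_, low) => m.get? low

-- ===== PRECONDITION & SPEC =====
-- Pre_ excludes columns lacking a 'name' key, on which Python A raises KeyError.
def Pre_identify_user_id_column_py (table_name : String) (columns : List (List (String × String))) : Prop :=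
  ∀ c ∈ columns, "name" ∈ c.map Prod.fst
instance (table_name : String) (columns : List (List (String × String))) : Decidable (Pre_identify_user_id_column_py table_name columns) := by unfold Pre_identify_user_id_column_py; infer_instance
def pvWitness_identify_user_id_column_py : String × (List (List (String × String))) := ("users", [[("name", "ID")]])

def Spec_identify_user_id_column_py (table_name : String) (columns : List (List (String × String))) (out : Option String) : Prop := out = identify_user_id_column_py_alt table_name columns
instance (table_name : String) (columns : List (List (String × String))) (out : Option String) : Decidable (Spec_identify_user_id_column_py table_name columns out) := by unfold Spec_identify_user_id_column_py; infer_instance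

-- ===== CLAIM (what is proved, stated in full; the proofs are below) =====
def Claim_equal_identify_user_id_column_py : Prop := ∀ (table_name : String) (columns : List (List (String × String))), Dom_identify_user_id_column_py table_name columns → Pre_identify_user_id_column_py table_name columns → Spec_identify_user_id_column_py table_name columns (identify_user_id_column_py table_name columns)

-- ===== LEMMAS AND PROOFS =====

def pvCands (q : String → Bool) (t : Nat) : List String → Nat → List ((Nat × Nat) × String)
  | [], _ => []
  | l :: ls, j => (if q l then [((t, j), l)] else []) ++ pvCands q t ls (j + 1)

lemma mem_pvCands (q : String → Bool) (t : Nat) :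
    ∀ (ls : List String) (j : Nat), ∀ x ∈ pvCands q t ls j, x.1.1 = t ∧ j ≤ x.1.2 := by
  intro ls
  induction ls with
  | nil => intro j x hx; simp [pvCands] at hx
  | cons l ls ih =>
    intro j x hx
    simp only [pvCands, List.mem_append] at hx
    rcases hx with hx | hx
    · split at hx <;> simp at hx
      subst hx; exact ⟨rfl, le_refl _⟩
    · obtain ⟨h1, h2⟩ := ih (j + 1) x hx
      exact ⟨h1, by omega⟩

lemma head_pvCands_cons (q : String → Bool) (t : Nat) :
    ∀ (ls : List String) (j : Nat) (c : (Nat × Nat) × String) (rest : List ((Nat × Nat) × String)),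
      pvCands q t ls j = c :: rest →
      c.1.1 = t ∧ j ≤ c.1.2 ∧ ∀ x ∈ rest, x.1.1 = t ∧ c.1.2 < x.1.2 := by
  intro ls
  induction ls with
  | nil => intro j c rest h; simp [pvCands] at h
  | cons l ls ih =>
    intro j c rest h
    simp only [pvCands] at h
    by_cases hq : q l
    · simp [hq] at h
      obtain ⟨hc, hrest⟩ := h
      subst hc; subst hrest
      refine ⟨rfl, le_refl _, ?_⟩
      intro x hx
      obtain ⟨h1, h2⟩ := mem_pvCands q t ls (j + 1) x hx
      refine ⟨h1, ?_⟩
      show j < x.1.2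
      omega
    · simp [hq] at h
      obtain ⟨h1, h2, h3⟩ := ih (j + 1) c rest h
      exact ⟨h1, by omega, h3⟩

lemma pvBMin_stays (b : (Nat × Nat) × String) :
    ∀ (l : List ((Nat × Nat) × String)), (∀ x ∈ l, pvKeyLt x.1 b.1 = false) →
      l.foldl pvBMin (some b) = some b := by
  intro l
  induction l with
  | nil => intro _; rfl
  | cons x l ih =>
    intro h
    have hx := h x (by simp)
    simp only [List.foldl_cons, pvBMin, hx]
    simp only [Bool.false_eq_true, if_false]
    exact ih (fun y hy => h y (by simp [hy]))

lemma pvBMin_cands (q : String → Bool) (t : Nat) (ls : List String) (j : Nat) :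
    (pvCands q t ls j).foldl pvBMin none = (pvCands q t ls j).head? := by
  cases hC : pvCands q t ls j with
  | nil => rfl
  | cons c rest =>
    obtain ⟨h1, h2, h3⟩ := head_pvCands_cons q t ls j c rest hC
    simp only [List.foldl_cons, List.head?_cons]
    show rest.foldl pvBMin (some c) = some c
    apply pvBMin_stays
    intro x hx
    obtain ⟨hx1, hx2⟩ := h3 x hx
    simp [pvKeyLt, hx1, h1]
    omega

lemma pvScan_eq :
    ∀ (cols : List (List (String × String))) (d : PySem.Dict String String)
      (acc : List ((Nat × Nat) × String)) (j : Nat),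
      cols.foldl pvBStep (d, acc, j) =
        (cols.foldl (fun d c => d.insert (pvLowName c) (pvOrigName c)) d,
         acc ++ pvCands pvIsSuffixHit 3 (cols.map pvLowName) j,
         j + cols.length) := by
  intro cols
  induction cols with
  | nil => intro d acc j; simp [pvCands]
  | cons c cols ih =>
    intro d acc j
    simp only [List.foldl_cons, List.map_cons, pvCands, List.length_cons]
    rw [show pvBStep (d, acc, j) c =
      (d.insert (pvLowName c) (pvOrigName c),
       (if pvIsSuffixHit (pvLowName c) then acc ++ [((3, j), pvLowName c)] else acc), j + 1) from rfl]
    rw [ih]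
    by_cases hs : pvIsSuffixHit (pvLowName c) <;> simp [hs] <;> omega

lemma pvPat_eq (m : PySem.Dict String String) :
    ∀ (ps : List String) (acc : List ((Nat × Nat) × String)) (i : Nat),
      ps.foldl (pvBPatStep m) (acc, i) =
        (acc ++ pvCands (fun p => m.contains p) 2 ps i, i + ps.length) := by
  intro ps
  induction ps with
  | nil => intro acc i; simp [pvCands]
  | cons p ps ih =>
    intro acc i
    simp only [List.foldl_cons, pvBPatStep, pvCands, List.length_cons]
    rw [ih]
    by_cases hp : m.contains p <;> simp [hp] <;> omega

lemma pvContains_eq (columns : List (List (String × String))) (p : String) :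
    (columns.foldl (fun d c => d.insert (pvLowName c) (pvOrigName c)) PySem.Dict.empty).contains p
      = (columns.map pvLowName).contains p := by
  have h1 := PySem.Dict.keys_foldl_insert_key columns pvLowName (fun _ c => pvOrigName c) (PySem.Dict.empty (κ := String) (ν := String))
  have h2 : ((columns.foldl (fun d c => d.insert (pvLowName c) (pvOrigName c)) PySem.Dict.empty).contains p = true)
      ↔ ((columns.map pvLowName).contains p = true) := by
    rw [PySem.Dict.contains_iff_mem_keys, h1]
    rw [PySem.Set.mem_update]
    simp [PySem.Dict.keys_empty]
  rw [Bool.eq_iff_iff]; exact h2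

lemma pvALoop3_eq (m : PySem.Dict String String) :
    ∀ (ls : List String) (j : Nat),
      pvALoop3 m ls = (match (pvCands pvIsSuffixHit 3 ls j).head? with
        | none => none
        | some x => m.get? x.2) := by
  intro ls
  induction ls with
  | nil => intro j; rfl
  | cons l ls ih =>
    intro j
    by_cases hs : pvIsSuffixHit l
    · simp [pvALoop3, pvCands, hs]
    · simp [pvALoop3, pvCands, hs, ih (j + 1)]

lemma pvALoop2_eq (m : PySem.Dict String String) (names : List String)
    (hc : ∀ p, names.contains p = m.contains p) :
    ∀ (ps : List String) (i : Nat),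
      pvALoop2 m names ps = (match (pvCands (fun p => m.contains p) 2 ps i).head? with
        | none => pvALoop3 m names
        | some x => m.get? x.2) := by
  intro ps
  induction ps with
  | nil => intro i; rfl
  | cons p ps ih =>
    intro i
    have hn : names.contains p = m.contains p := hc p
    by_cases hp : m.contains p
    · have hmem : p ∈ names := by
        have h2 := hn.trans hp
        simpa using h2
      simp [pvALoop2, pvCands, hp, hmem]
    · have hmem : p ∉ names := by
        intro hm
        exact hp (hn.symm.trans (by simpa using hm))
      simp [pvALoop2, pvCands, hp, hmem, ih (i + 1)]

-- ===== VERDICT (by name: the statement is the Claim_ definition above) =====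
theorem identify_user_id_column_py_spec : Claim_equal_identify_user_id_column_py := by
  intro table_name columns _dom _pre
  unfold Spec_identify_user_id_column_py
  unfold identify_user_id_column_py identify_user_id_column_py_alt
  rw [pvScan_eq columns PySem.Dict.empty [] 0]
  simp only [List.nil_append]
  set names := columns.map pvLowName with hnames
  set m := columns.foldl (fun d c => d.insert (pvLowName c) (pvOrigName c)) PySem.Dict.empty with hm
  set cond := (PySem.Str.lower table_name == "users" || PySem.Str.lower table_name == "user") with hcond
  set C3 := pvCands pvIsSuffixHit 3 names 0 with hC3def
  set C2 := pvCands (fun p => m.contains p) 2 pvPatterns 0 with hC2def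
  have hc : ∀ p, names.contains p = m.contains p := fun p => (pvContains_eq columns p).symm
  have hAif : (cond && names.contains "id") = (cond && m.contains "id") := by rw [hc "id"]
  rw [pvPat_eq m pvPatterns [] 0]
  simp only [List.nil_append, hAif]
  by_cases hcase : (cond && m.contains "id") = true
  · -- priority-1 candidate exists; it wins the min
    rw [if_pos hcase, if_pos hcase]
    have h3 : C3.foldl pvBMin none = C3.head? := pvBMin_cands _ _ _ _
    rw [List.foldl_append, List.foldl_append, h3]
    have hmid : List.foldl pvBMin C3.head? [((1, 0), "id")] = some ((1, 0), "id") := by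
      cases hh : C3.head? with
      | none => rfl
      | some x3 =>
        have hx3 : x3.1.1 = 3 := by
          cases hC3 : C3 with
          | nil => rw [hC3] at hh; simp at hh
          | cons c rest =>
            rw [hC3] at hh; simp at hh
            obtain ⟨h1, _, _⟩ := head_pvCands_cons _ _ _ _ _ _ (hC3def.symm.trans hC3)
            subst hh; exact h1
        simp only [List.foldl_cons, List.foldl_nil, pvBMin]
        have : pvKeyLt ((1, 0), "id").1 x3.1 = true := by
          simp [pvKeyLt, hx3]
        rw [this]
        simp
    rw [hmid]
    have hstay : C2.foldl pvBMin (some ((1, 0), "id")) = some ((1, 0), "id") := by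
      apply pvBMin_stays
      intro x hx
      obtain ⟨h1, _⟩ := mem_pvCands _ _ _ _ x (hC2def ▸ hx)
      simp [pvKeyLt, h1]
    rw [hstay]
  · -- no priority-1 candidate: min over C3 ++ C2 vs the two remaining scans
    rw [if_neg hcase, if_neg hcase]
    rw [pvALoop2_eq m names hc pvPatterns 0]
    rw [pvALoop3_eq m names 0]
    simp only [List.append_nil]
    rw [← hC2def, ← hC3def]
    have h3 : C3.foldl pvBMin none = C3.head? := pvBMin_cands _ _ _ _
    rw [List.foldl_append, h3]
    cases hC2 : C2 with
    | nil =>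
      simp only [List.foldl_nil, List.head?_nil]
      cases hh : C3.head? with
      | none => rfl
      | some x => rfl
    | cons c2 rest =>
      obtain ⟨hc1, _, hrest⟩ := head_pvCands_cons _ _ _ _ _ _ (hC2def.symm.trans hC2)
      have hfirst : List.foldl pvBMin C3.head? (c2 :: rest) = some c2 := by
        have hb : pvBMin C3.head? c2 = some c2 := by
          cases hh : C3.head? with
          | none => rfl
          | some x3 =>
            have hx3 : x3.1.1 = 3 := by
              cases hC3 : C3 with
              | nil => rw [hC3] at hh; simp at hh
              | cons c rest3 =>
                rw [hC3] at hh; simp at hh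
                obtain ⟨h1, _, _⟩ := head_pvCands_cons _ _ _ _ _ _ (hC3def.symm.trans hC3)
                subst hh; exact h1
            simp only [pvBMin]
            have : pvKeyLt c2.1 x3.1 = true := by simp [pvKeyLt, hx3, hc1]
            rw [this]
            simp
        simp only [List.foldl_cons, hb]
        apply pvBMin_stays
        intro x hx
        obtain ⟨hx1, hx2⟩ := hrest x hx
        simp [pvKeyLt, hx1, hc1]
        omega
      rw [hfirst]
      rfl
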